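-- pv_equiv track=rewrite | github.com/myrobot2020/dama-mob | an3_parse_book3.py | _trim_blank_edges
-- ===== SOURCE A (Python) =====
-- from typing import Dict, List, Optional, Tuple
--
-- def _trim_blank_edges(lines: List[str]) -> List[str]:
--     i0 = 0
--     i1 = len(lines)
--     while i0 < i1 and not lines[i0].strip():
--         i0 += 1
--     while i1 > i0 and not lines[i1 - 1].strip():
--         i1 -= 1
--     return lines[i0:i1]
-- ===== SOURCE B (Python) =====
-- from typing import Dict, List, Optional, Tuple
--
-- def _trim_blank_edges(lines: List[str]) -> List[str]:
--     idx = [i for i, l in enumerate(lines) if l.strip()]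
--     if not idx:
--         return lines[0:0]
--     return lines[idx[0]:idx[-1] + 1]
-- ===== Notes on version B (the rewrite author's own statement) =====
-- stated objective: simpler
-- what changed: Replaces the two edge-converging while-loop pointer scans with a single forward enumerate pass that collects the indices of non-blank lines and slices between the first and last of them.
import Mathlib
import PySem

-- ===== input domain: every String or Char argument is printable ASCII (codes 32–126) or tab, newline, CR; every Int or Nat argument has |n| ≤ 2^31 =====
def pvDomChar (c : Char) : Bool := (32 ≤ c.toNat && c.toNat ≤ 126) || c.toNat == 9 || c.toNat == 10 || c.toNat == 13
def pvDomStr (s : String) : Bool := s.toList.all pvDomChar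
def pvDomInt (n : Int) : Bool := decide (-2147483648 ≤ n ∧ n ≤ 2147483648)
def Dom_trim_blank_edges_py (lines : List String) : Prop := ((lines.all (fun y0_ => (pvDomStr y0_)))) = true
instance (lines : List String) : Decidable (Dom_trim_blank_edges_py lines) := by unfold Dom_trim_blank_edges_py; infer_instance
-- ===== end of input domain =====

-- B replaces A's two edge-converging pointer scans by one forward enumerate pass that
-- collects the non-blank indices and slices between its first and last entry (simpler decomposition).


-- ===== PORT A =====
-- `not l.strip()` (blank-line test), the primitive both programs use
def pyBlank (s : String) : Bool := PySem.Str.strip s == ""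

-- `while i0 < i1 and not lines[i0].strip(): i0 += 1`
def aLoop1 (lines : List String) (i0 i1 : Nat) : Nat :=
  if h : i0 < i1 ∧ pyBlank (lines.getD i0 "") = true then aLoop1 lines (i0 + 1) i1 else i0
  termination_by i1 - i0
  decreasing_by omega

-- `while i1 > i0 and not lines[i1 - 1].strip(): i1 -= 1`
def aLoop2 (lines : List String) (i0 i1 : Nat) : Nat :=
  if h : i0 < i1 ∧ pyBlank (lines.getD (i1 - 1) "") = true then aLoop2 lines i0 (i1 - 1) else i1
  termination_by i1 - i0
  decreasing_by omega

def trim_blank_edges_py (lines : List String) : List String :=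
  let i1 := lines.length
  let i0 := aLoop1 lines 0 i1
  let i1' := aLoop2 lines i0 i1
  PySem.List.slice lines (some (i0 : Int)) (some (i1' : Int))

-- ===== PORT B =====
-- `idx = [i for i, l in enumerate(lines) if l.strip()]`
def bIdx (lines : List String) : List Int :=
  (PySem.List.enumerate lines 0).filterMap
    (fun p => if pyBlank p.2 then none else some p.1)

-- `return lines[0:0] if not idx else lines[idx[0]:idx[-1] + 1]`
def trim_blank_edges_py_alt (lines : List String) : List String :=
  let idx := bIdx lines
  match idx.head?, idx.getLast? with
  | some f, some l => PySem.List.slice lines (some f) (some (l + 1))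
  | _, _ => PySem.List.slice lines (some 0) (some 0)

-- ===== PRECONDITION & SPEC =====
def Spec_trim_blank_edges_py (lines : List String) (out : List String) : Prop := out = trim_blank_edges_py_alt lines
instance (lines : List String) (out : List String) : Decidable (Spec_trim_blank_edges_py lines out) := by unfold Spec_trim_blank_edges_py; infer_instance

-- ===== CLAIM (what is proved, stated in full; the proofs are below) =====
def Claim_equal_trim_blank_edges_py : Prop := ∀ (lines : List String), Dom_trim_blank_edges_py lines → Spec_trim_blank_edges_py lines (trim_blank_edges_py lines)

-- ===== LEMMAS AND PROOFS =====

-- A's first loop stops at the number of leading blank lines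
theorem aLoop1_eq (lines : List String) (i0 : Nat) (h : i0 ≤ lines.length) :
    aLoop1 lines i0 lines.length = i0 + ((lines.drop i0).takeWhile pyBlank).length := by
  by_cases hlt : i0 < lines.length
  · have hdrop : lines.drop i0 = lines[i0] :: lines.drop (i0 + 1) :=
      List.drop_eq_getElem_cons hlt
    have hgd : lines.getD i0 "" = lines[i0] := List.getD_eq_getElem lines "" hlt
    by_cases hb : pyBlank lines[i0] = true
    · rw [aLoop1]
      simp only [hgd, hb, hlt, and_self, dite_true]
      rw [aLoop1_eq lines (i0 + 1) (by omega), hdrop, List.takeWhile_cons_of_pos hb]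
      simp
      omega
    · rw [aLoop1]
      simp only [hgd, hb]
      rw [hdrop, List.takeWhile_cons_of_neg (by simp [hb])]
      simp
  · have : i0 = lines.length := by omega
    subst this
    rw [aLoop1]
    simp
  termination_by lines.length - i0
  decreasing_by omega

-- A's second loop strips the trailing blank lines of lines[:i1], never below i0
theorem aLoop2_eq (lines : List String) (i0 i1 : Nat) (h0 : i0 ≤ i1) (h1 : i1 ≤ lines.length) :
    aLoop2 lines i0 i1 = max i0 (i1 - (((lines.take i1).reverse.takeWhile pyBlank).length)) := by
  by_cases hlt : i0 < i1
  · have hi : i1 - 1 < lines.length := by omega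
    have htake : lines.take i1 = lines.take (i1 - 1) ++ [lines[i1 - 1]] := by
      conv_lhs => rw [show i1 = (i1 - 1) + 1 by omega]
      rw [List.take_add_one]
      simp [List.getElem?_eq_getElem hi]
    have hgd : lines.getD (i1 - 1) "" = lines[i1 - 1] := List.getD_eq_getElem lines "" hi
    have hrev : (lines.take i1).reverse = lines[i1 - 1] :: (lines.take (i1 - 1)).reverse := by
      rw [htake]; simp
    by_cases hb : pyBlank lines[i1 - 1] = true
    · rw [aLoop2]
      simp only [hgd, hb, hlt, and_self, dite_true]
      rw [aLoop2_eq lines i0 (i1 - 1) (by omega) (by omega)]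
      rw [hrev, List.takeWhile_cons_of_pos hb]
      simp
      omega
    · rw [aLoop2]
      simp only [hgd, hb]
      rw [hrev, List.takeWhile_cons_of_neg (by simp [hb])]
      simp
      omega
  · have : i0 = i1 := by omega
    subst this
    rw [aLoop2]
    simp [hlt]
  termination_by i1 - i0
  decreasing_by omega

-- bIdx generalised over the enumerate start offset
def bIdxG (lines : List String) (s : Int) : List Int :=
  (PySem.List.enumerate lines s).filterMap
    (fun p => if pyBlank p.2 then none else some p.1)

theorem bIdxG_nil_iff (lines : List String) (s : Int) :
    bIdxG lines s = [] ↔ ∀ x ∈ lines, pyBlank x = true := by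
  induction lines generalizing s with
  | nil => simp [bIdxG, PySem.List.enumerate_nil]
  | cons a l ih =>
    simp only [bIdxG, PySem.List.enumerate_cons, List.filterMap_cons]
    by_cases hb : pyBlank a = true
    · simp only [hb, if_true]
      rw [show ((PySem.List.enumerate l (s+1)).filterMap
            (fun p : Int × String => if pyBlank p.2 then none else some p.1)) = bIdxG l (s+1) from rfl,
          ih (s+1)]
      simp [hb]
    · simp [hb]

theorem bIdxG_head (lines : List String) (s : Int) (h : ¬ ∀ x ∈ lines, pyBlank x = true) :
    (bIdxG lines s).head? = some (s + ((lines.takeWhile pyBlank).length : Int)) := by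
  induction lines generalizing s with
  | nil => simp at h
  | cons a l ih =>
    simp only [bIdxG, PySem.List.enumerate_cons, List.filterMap_cons]
    by_cases hb : pyBlank a = true
    · have h' : ¬ ∀ x ∈ l, pyBlank x = true := by
        intro hall; exact h (by simpa [hb] using hall)
      rw [List.takeWhile_cons_of_pos hb]
      simp only [hb, if_true]
      rw [show ((PySem.List.enumerate l (s+1)).filterMap
            (fun p : Int × String => if pyBlank p.2 then none else some p.1)) = bIdxG l (s+1) from rfl,
          ih (s+1) h']
      simp; ring
    · rw [List.takeWhile_cons_of_neg (by simp [hb])]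
      simp [hb]

theorem bIdxG_last (lines : List String) (s : Int) (h : ¬ ∀ x ∈ lines, pyBlank x = true) :
    (bIdxG lines s).getLast? =
      some (s + (lines.length : Int) - 1 - ((lines.reverse.takeWhile pyBlank).length : Int)) := by
  induction lines using List.reverseRecOn generalizing s with
  | nil => simp at h
  | append_singleton l a ih =>
    have hsplit : bIdxG (l ++ [a]) s =
        bIdxG l s ++ bIdxG [a] (s + (l.length : Int)) := by
      simp [bIdxG, PySem.List.enumerate_append, List.filterMap_append]
    by_cases hb : pyBlank a = true
    · have h' : ¬ ∀ x ∈ l, pyBlank x = true := by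
        intro hall; refine h ?_
        intro x hx
        rcases List.mem_append.mp hx with h1 | h1
        · exact hall x h1
        · simp at h1; subst h1; exact hb
      have hone : bIdxG [a] (s + (l.length : Int)) = [] := by
        simp [bIdxG, PySem.List.enumerate_cons, PySem.List.enumerate_nil, hb]
      rw [hsplit, hone, List.append_nil, ih s h']
      rw [List.reverse_append]
      simp only [List.reverse_singleton, List.singleton_append,
        List.takeWhile_cons_of_pos hb]
      simp
      ring
    · have hone : bIdxG [a] (s + (l.length : Int)) = [s + (l.length : Int)] := by
        simp [bIdxG, PySem.List.enumerate_cons, PySem.List.enumerate_nil, hb]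
      rw [hsplit, hone, List.getLast?_concat]
      rw [List.reverse_append]
      simp only [List.reverse_singleton, List.singleton_append,
        List.takeWhile_cons_of_neg (p := pyBlank) (a := a) (l := l.reverse) hb]
      simp
      ring

-- with a non-blank line present, leading blanks + trailing blanks < length
theorem first_lt_last (lines : List String) (h : ¬ ∀ x ∈ lines, pyBlank x = true) :
    (lines.takeWhile pyBlank).length + (lines.reverse.takeWhile pyBlank).length < lines.length := by
  set L := (lines.takeWhile pyBlank).length with hL
  set T := (lines.reverse.takeWhile pyBlank).length with hT
  have hLle : L ≤ lines.length := (List.takeWhile_prefix _).length_le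
  have hLlt : L < lines.length := by
    rcases Nat.lt_or_ge L lines.length with h1 | h1
    · exact h1
    · exfalso
      have : (lines.takeWhile pyBlank) = lines :=
        List.IsPrefix.eq_of_length (List.takeWhile_prefix _) (by omega)
      exact h (fun x hx => List.mem_takeWhile_imp (this ▸ hx))
  have hdw : lines.dropWhile pyBlank ≠ [] := by
    intro hnil
    exact h (List.dropWhile_eq_nil_iff.mp hnil)
  have hnb : pyBlank ((lines.dropWhile pyBlank).head hdw) = false :=
    List.head_dropWhile_not pyBlank hdw
  have hidx : lines[L]? = some ((lines.dropWhile pyBlank).head hdw) := by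
    conv_lhs => rw [← List.takeWhile_append_dropWhile (p := pyBlank) (l := lines)]
    rw [List.getElem?_append_right (by omega)]
    rw [show L - (lines.takeWhile pyBlank).length = 0 by omega]
    rw [← List.head?_eq_getElem?, List.head?_eq_some_head hdw]
  by_contra hcon
  push_neg at hcon
  have hTle : T ≤ lines.length := by
    have := (List.takeWhile_prefix (p := pyBlank) (l := lines.reverse)).length_le
    simpa using this
  have hrevidx : lines.length - 1 - L < T := by omega
  obtain ⟨t, ht⟩ := List.takeWhile_prefix (p := pyBlank) (l := lines.reverse)
  have e1 : lines.reverse[lines.length - 1 - L]? =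
      (lines.reverse.takeWhile pyBlank)[lines.length - 1 - L]? := by
    conv_lhs => rw [← ht]
    rw [List.getElem?_append_left (by omega)]
  have e2 : lines.reverse[lines.length - 1 - L]? = lines[L]? := by
    rw [List.getElem?_reverse (by omega)]
    congr 1
    omega
  have hmem : ((lines.dropWhile pyBlank).head hdw) ∈ lines.reverse.takeWhile pyBlank := by
    have := e1.symm.trans (e2.trans hidx)
    exact List.mem_of_getElem? this
  have := List.mem_takeWhile_imp hmem
  rw [hnb] at this
  simp at this

-- ===== VERDICT (by name: the statement is the Claim_ definition above) =====
theorem trim_blank_edges_py_spec : Claim_equal_trim_blank_edges_py := by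
  intro lines _
  unfold Spec_trim_blank_edges_py
  have hLle : (lines.takeWhile pyBlank).length ≤ lines.length :=
    (List.takeWhile_prefix _).length_le
  have hTle : (lines.reverse.takeWhile pyBlank).length ≤ lines.length := by
    have := (List.takeWhile_prefix (p := pyBlank) (l := lines.reverse)).length_le
    simpa using this
  have hL : aLoop1 lines 0 lines.length = (lines.takeWhile pyBlank).length := by
    rw [aLoop1_eq lines 0 (Nat.zero_le _)]
    simp
  have h2 : aLoop2 lines ((lines.takeWhile pyBlank).length) lines.length =
      max ((lines.takeWhile pyBlank).length)
        (lines.length - (lines.reverse.takeWhile pyBlank).length) := by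
    rw [aLoop2_eq lines _ _ hLle (le_refl _), List.take_length]
  have hA : trim_blank_edges_py lines =
      PySem.List.slice lines (some (((lines.takeWhile pyBlank).length : Nat) : Int))
        (some ((max ((lines.takeWhile pyBlank).length)
          (lines.length - (lines.reverse.takeWhile pyBlank).length) : Nat) : Int)) := by
    simp only [trim_blank_edges_py, hL, h2]
  by_cases hall : ∀ x ∈ lines, pyBlank x = true
  · have hBnil : bIdx lines = [] := (bIdxG_nil_iff lines 0).mpr hall
    have hLn : (lines.takeWhile pyBlank).length = lines.length := by
      rw [List.takeWhile_eq_self_iff.mpr hall]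
    rw [hA]
    simp only [trim_blank_edges_py_alt, hBnil, List.head?_nil, List.getLast?_nil]
    rw [hLn, show max lines.length (lines.length - (lines.reverse.takeWhile pyBlank).length)
          = lines.length by omega]
    rw [PySem.List.slice_natCast,
        show ((0:Int)) = ((0:Nat):Int) by simp, PySem.List.slice_natCast]
    simp
  · have hhead : (bIdx lines).head? =
        some ((0:Int) + ((lines.takeWhile pyBlank).length : Int)) := bIdxG_head lines 0 hall
    have hlast : (bIdx lines).getLast? =
        some ((0:Int) + (lines.length : Int) - 1 - ((lines.reverse.takeWhile pyBlank).length : Int)) :=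
      bIdxG_last lines 0 hall
    have hlt := first_lt_last lines hall
    rw [hA]
    simp only [trim_blank_edges_py_alt, hhead, hlast]
    rw [show max ((lines.takeWhile pyBlank).length)
          (lines.length - (lines.reverse.takeWhile pyBlank).length)
          = lines.length - (lines.reverse.takeWhile pyBlank).length by omega]
    congr 1
    · push_cast
      ring
    · congr 1
      push_cast [Nat.cast_sub hTle]
      ring
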